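/- GENERATED by mk_final_copies.py from the proof of the farm's unit `codebook_decode_deinterleave_repeat.3` (farm:codebook_decode_deinterleave_repeat.3.2: Lemmas.lean) as the
   re-elaboration sweep compiled it — do not edit. -/
import Asan.CheckWalk
import Vorbis.Spec.Units.codebook_decode_deinterleave_repeat_3

/-!
  Lemmas of unit `codebook_decode_deinterleave_repeat.3` (the sequence arm, loop 1938).

  * `MemInv`: what every state of the loop knows about its MEMORY (the memory fields of `Deint.Common` and `Mid`, and the
    `total_decode` slot); `MemInv.of_common` / `MemInv.common` convert from and to the assertions of Vorbis/Spec/Codebook/Deint.lean.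
  * `OffAll`: a window of stores that meets nothing `MemInv` reads; `OffAll.scratch` (the function's own scratch slots
    `[rsp+4, rsp+12)` and the return addresses of the check calls below rsp), `OffAll.cell` (one float `outputs[c][p]`).
  * `MemInv.step`: `MemInv` follows the memory over stores inside such windows.
  * the sites of the four checks, the element addresses as numbers, the 32-bit counters.
-/

open X86 X86.User Asan Vorbis Vorbis.Spec

namespace Vorbis.Spec.codebook_decode_deinterleave_repeat_3

/-! ### Where things are -/

/-- **Where a live site is, seen from inside codebook_decode_deinterleave_repeat**: above the text, below the shadow, and off the
function's stack INCLUDING its two argument slots (`DeintPre.args`: the layer holds with the clean region ending at `rsp + 24`). -/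
theorem where_site {others : List Obj} {frames : List (Nat × FrameLayout)} {Blk : Block → Prop} {len : Nat} {e : State}
    (hpre : DeintPre others frames Blk len e) (hroom : 7340032 + 496 ≤ (e.reg .rsp).toNat) {a n : Nat}
    (hs : Site (Live (stackObjs frames ++ others)) a n) :
    0x119d40 ≤ a ∧ a + n ≤ 0xC00000 ∧ (a + n ≤ 0x700000 ∨ (e.reg .rsp).toNat + 24 ≤ a) := by
  have hw := site_where hpre.args hpre.book.reader.shadow.offText (by omega) hs
  have htop := hpre.args.stack.hi
  have e1 : L.textHi = 0x119d40 := rfl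
  omega

/-- The same for a non-empty allocated block. -/
theorem where_blk {others : List Obj} {frames : List (Nat × FrameLayout)} {Blk : Block → Prop} {len : Nat} {e : State}
    (hpre : DeintPre others frames Blk len e) (hroom : 7340032 + 496 ≤ (e.reg .rsp).toNat) {B : Block} (hB : Blk B)
    (hn : 1 ≤ B.size) :
    0x119d40 ≤ B.base ∧ B.base + B.size ≤ 0xC00000 ∧ (B.base + B.size ≤ 0x700000 ∨ (e.reg .rsp).toNat + 24 ≤ B.base) :=
  where_site hpre hroom (Site.of_blk hpre.book.reader.env.live hB (Nat.le_refl _) (Nat.le_refl _) hn)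

/-- Where `*f` is. -/
theorem where_decoder {others : List Obj} {frames : List (Nat × FrameLayout)} {Blk : Block → Prop} {len : Nat} {e : State}
    (hpre : DeintPre others frames Blk len e) :
    0x119d40 ≤ Deint.fOf e ∧ Deint.fOf e + 1808 ≤ 0xC00000 ∧
      (Deint.fOf e + 1808 ≤ 0x700000 ∨ (e.reg .rsp).toNat + 24 ≤ Deint.fOf e) := by
  have hw := hpre.book.reader.env.obj.where_ hpre.args hpre.book.reader.shadow.offText (by decide)
  simp only [Off.sizeof.stb_vorbis] at hw
  have htop := hpre.args.stack.hi
  simp only [Deint.fOf]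
  omega

/-- Where the struct at `c` is. -/
theorem where_book {others : List Obj} {frames : List (Nat × FrameLayout)} {Blk : Block → Prop} {len : Nat} {e : State}
    (hpre : DeintPre others frames Blk len e) (hroom : 7340032 + 496 ≤ (e.reg .rsp).toNat) :
    0x119d40 ≤ (e.reg .rsi).toNat ∧ (e.reg .rsi).toNat + 2120 ≤ 0xC00000 ∧
      ((e.reg .rsi).toNat + 2120 ≤ 0x700000 ∨ (e.reg .rsp).toNat + 24 ≤ (e.reg .rsi).toNat) := by
  obtain ⟨B, hB, hin⟩ := hpre.book.book
  have hs : Site (Live (stackObjs frames ++ others)) (e.reg .rsi).toNat 2120 :=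
    Codebook.site_field hpre.book.reader.env.live hB hin 0 2120 (by simp only [Off.sizeof.Codebook]; omega) (by omega) rfl
  exact where_site hpre hroom hs

/-- Where the table `outputs[0 .. ch)` is. -/
theorem where_table {others : List Obj} {frames : List (Nat × FrameLayout)} {Blk : Block → Prop} {len : Nat} {e : State}
    (hpre : DeintPre others frames Blk len e) (hroom : 7340032 + 496 ≤ (e.reg .rsp).toNat) :
    0x119d40 ≤ Deint.outsOf e ∧ Deint.outsOf e + 8 * Deint.chOf e ≤ 0xC00000 ∧
      (Deint.outsOf e + 8 * Deint.chOf e ≤ 0x700000 ∨ (e.reg .rsp).toNat + 24 ≤ Deint.outsOf e) :=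
  where_site hpre hroom hpre.table

/-- Where the window `outputs[k][0 .. len)` of a non-NULL pointer is (`len ≥ 1`). -/
theorem where_win {others : List Obj} {frames : List (Nat × FrameLayout)} {Blk : Block → Prop} {len : Nat} {e : State}
    (hpre : DeintPre others frames Blk len e) (hroom : 7340032 + 496 ≤ (e.reg .rsp).toNat) {k : Nat}
    (hk : k < Deint.chOf e) (hq : e.mem.ptr (Deint.outsOf e + 8 * k) ≠ 0) (hlen : 1 ≤ Deint.lenOf e) :
    0x119d40 ≤ e.mem.ptr (Deint.outsOf e + 8 * k) ∧
      e.mem.ptr (Deint.outsOf e + 8 * k) + 4 * Deint.lenOf e ≤ 0xC00000 ∧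
      (e.mem.ptr (Deint.outsOf e + 8 * k) + 4 * Deint.lenOf e ≤ 0x700000 ∨
        (e.reg .rsp).toNat + 24 ≤ e.mem.ptr (Deint.outsOf e + 8 * k)) := by
  simp only [Deint.outsOf, Deint.chOf, Deint.lenOf] at hk hq hlen ⊢
  rcases hpre.outs k hk with h0 | ⟨sz, hsz, hB⟩
  · exact absurd h0 hq
  · have hs : Site (Live (stackObjs frames ++ others)) (e.mem.ptr ((e.reg .rdx).toNat + 8 * k))
        (4 * e.mem.u32 ((e.reg .rsp).toNat + 8)) :=
      Site.of_blk hpre.book.reader.env.live hB (Nat.le_refl _) (by simp only []; omega) (by omega)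
    exact where_site hpre hroom hs

/-! ### The memory invariant of the loop -/

/-- **What every state of loop 1938 knows about its memory `m`**: the memory fields of `Mid` (the return address and the six saved
registers in their slots, the footprint since the entry `e`, the text, the shadow) and of `Deint.Common` (the reader's post,
`CodebookOK c`, the separation, the fields of `*c`, the spill slots, the table of output pointers, the two ints), and the
`total_decode` slot of `Deint.Locals`. NOT in it: the scratch slots `[rsp+4]` (`last`) and `[rsp+8]` (`p_inter`). -/
structure MemInv (others : List Obj) (frames : List (Nat × FrameLayout)) (Blk : Block → Prop) (len : Nat) (u₀ : State)
    (ret : Word) (e : State) (td : Int) (m : Mem) : Prop where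
  ra : UInt64.ofNat (m.readLE (e.reg .rsp) 8) = ret
  r15 : UInt64.ofNat (m.readLE (e.reg .rsp - 8) 8) = e.reg .r15
  r14 : UInt64.ofNat (m.readLE (e.reg .rsp - 16) 8) = e.reg .r14
  r13 : UInt64.ofNat (m.readLE (e.reg .rsp - 24) 8) = e.reg .r13
  r12 : UInt64.ofNat (m.readLE (e.reg .rsp - 32) 8) = e.reg .r12
  rbp : UInt64.ofNat (m.readLE (e.reg .rsp - 40) 8) = e.reg .rbp
  rbx : UInt64.ofNat (m.readLE (e.reg .rsp - 48) 8) = e.reg .rbx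
  same : Mem.SameExcept ((codebook_decode_deinterleave_repeat.spec others frames Blk len).footprint e) e.mem m
  code : CodeOK u₀ m
  untouched : ShadowUntouched e.mem m
  reader : ReaderPost Blk len e.mem m (Deint.fOf e)
  cb : CodebookOK Blk m (Deint.cOf e)
  apart : BookApart m (Deint.fOf e) (Deint.cOf e)
  book : Codebook.SameFields e.mem m (Deint.cOf e)
  type2 : Codebook.lookup_type m (Deint.cOf e) = 2
  chSlot : m.readLE (e.reg .rsp - 92) 4 = Deint.chOf e
  outsSlot : UInt64.ofNat (m.readLE (e.reg .rsp - 88) 8) = e.reg .rdx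
  fSlot : UInt64.ofNat (m.readLE (e.reg .rsp - 80) 8) = e.reg .rdi
  cpSlot : UInt64.ofNat (m.readLE (e.reg .rsp - 72) 8) = e.reg .r8
  ppSlot : UInt64.ofNat (m.readLE (e.reg .rsp - 64) 8) = e.reg .r9
  lenSlot : m.readLE (e.reg .rsp + 8) 4 = Deint.lenOf e
  table : ∀ k, k < Deint.chOf e → m.ptr (Deint.outsOf e + 8 * k) = e.mem.ptr (Deint.outsOf e + 8 * k)
  cInt : m.i32 (Deint.cpOf e) = e.mem.i32 (Deint.cpOf e)
  pInt : m.i32 (Deint.ppOf e) = e.mem.i32 (Deint.ppOf e)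
  tdSlot : sint32 (m.readLE (e.reg .rsp + 16) 4) = td

/-- `MemInv` from the assertion's `Common` and `Locals` (segment entry). -/
theorem MemInv.of_common {others : List Obj} {frames : List (Nat × FrameLayout)} {Blk : Block → Prop} {len : Nat} {u₀ : State}
    {ret : Word} {e v : State} {ci pi eff : Nat} {td : Int} (h : Deint.Common others frames Blk len u₀ ret e v)
    (hl : Deint.Locals e v ci pi eff td) : MemInv others frames Blk len u₀ ret e td v.mem :=
  ⟨h.mid.ra, h.mid.r15, h.mid.r14, h.mid.r13, h.mid.r12, h.mid.rbp, h.mid.rbx, h.mid.same, h.mid.code, h.mid.untouched,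
    h.reader, h.cb, h.apart, h.book, h.type2, h.chSlot, h.outsSlot, h.fSlot, h.cpSlot, h.ppSlot, h.lenSlot, h.table, h.cInt,
    h.pInt, hl.tdSlot⟩

/-- `Deint.Common` of a state whose memory satisfies `MemInv` (segment exit): the frame facts that are not about the memory
(`AtEntry`, the precondition, rsp, `abiInv`, r12 = c) are given. -/
theorem MemInv.common {others : List Obj} {frames : List (Nat × FrameLayout)} {Blk : Block → Prop} {len : Nat} {u₀ : State}
    {ret : Word} {e v : State} {td : Int} (h : MemInv others frames Blk len u₀ ret e td v.mem)
    (he : AtEntry (conv u₀) L.codebook_decode_deinterleave_repeat.entry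
      (codebook_decode_deinterleave_repeat.spec others frames Blk len).frame ret e)
    (hpre : DeintPre others frames Blk len e) (hrsp : v.reg .rsp = e.reg .rsp - 104) (hinv : abiInv v)
    (hc : v.reg .r12 = e.reg .rsi) : Deint.Common others frames Blk len u₀ ret e v :=
  ⟨⟨he, hrsp, h.ra, h.r15, h.r14, h.r13, h.r12, h.rbp, h.rbx, h.same, h.code, hinv, h.untouched⟩, hpre, h.reader, h.cb,
    h.apart, h.book, h.type2, hc, h.chSlot, h.outsSlot, h.fSlot, h.cpSlot, h.ppSlot, h.lenSlot, h.table, h.cInt, h.pInt⟩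

/-- **A window of stores that meets nothing `MemInv` reads**: off the frame above the scratch slots and the two argument slots
(`stack`), off `*f`, the struct at `c`, the `sorted_values` block, the table of output pointers, the two ints, the text, the
shadow; and inside the contract's footprint. -/
structure OffAll (others : List Obj) (frames : List (Nat × FrameLayout)) (Blk : Block → Prop) (len : Nat) (e : State)
    (w : Span) : Prop where
  stack : w.hi ≤ (e.reg .rsp).toNat - 92 ∨ (e.reg .rsp).toNat + 24 ≤ w.lo
  obj : w.hi ≤ Deint.fOf e ∨ Deint.fOf e + 1808 ≤ w.lo
  book : w.hi ≤ Deint.cOf e ∨ Deint.cOf e + 2120 ≤ w.lo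
  sv : 1 ≤ Codebook.sorted_entries e.mem (Deint.cOf e) →
    (Codebook.svBlock e.mem (Deint.cOf e)).base + (Codebook.svBlock e.mem (Deint.cOf e)).size ≤ w.lo ∨
      w.hi ≤ (Codebook.svBlock e.mem (Deint.cOf e)).base
  table : w.hi ≤ Deint.outsOf e ∨ Deint.outsOf e + 8 * Deint.chOf e ≤ w.lo
  cp : w.hi ≤ Deint.cpOf e ∨ Deint.cpOf e + 4 ≤ w.lo
  pp : w.hi ≤ Deint.ppOf e ∨ Deint.ppOf e + 4 ≤ w.lo
  text : 0x119d40 ≤ w.lo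
  shadow : w.hi ≤ 0xC00000
  foot : ∀ a : Nat, w.lo ≤ a → a < w.hi →
    ∃ w' ∈ (codebook_decode_deinterleave_repeat.spec others frames Blk len).footprint e, w'.lo ≤ a ∧ a < w'.hi

/-- A stack slot above the scratch slots reads the same after stores inside `OffAll` windows. -/
theorem slot_keep {others : List Obj} {frames : List (Nat × FrameLayout)} {Blk : Block → Prop} {len : Nat} {e : State}
    {ws : List Span} {m m' : Mem} (hs : Mem.SameExcept ws m m') (hoff : ∀ w, w ∈ ws → OffAll others frames Blk len e w)
    (a : Word) (k : Nat) (h1 : (e.reg .rsp).toNat - 92 ≤ a.toNat) (h2 : a.toNat + k ≤ (e.reg .rsp).toNat + 24)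
    (h3 : (e.reg .rsp).toNat + 24 < 2 ^ 64) : m'.readLE a k = m.readLE a k := by
  apply hs.readLE a k (by omega)
  intro w hw
  have := (hoff w hw).stack
  omega

/-- **`MemInv` follows the memory over stores inside `OffAll` windows** (the body of loop 1938: the scratch slots, the return
addresses of the check calls, one float). -/
theorem MemInv.step {others : List Obj} {frames : List (Nat × FrameLayout)} {Blk : Block → Prop} {len : Nat} {u₀ : State}
    {ret : Word} {e : State} {td : Int} {m m' : Mem} (h : MemInv others frames Blk len u₀ ret e td m)
    (hpre : DeintPre others frames Blk len e) (hroom : 7340032 + 496 ≤ (e.reg .rsp).toNat) {ws : List Span}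
    (hs : Mem.SameExcept ws m m') (hoff : ∀ w, w ∈ ws → OffAll others frames Blk len e w) :
    MemInv others frames Blk len u₀ ret e td m' := by
  have htop := hpre.args.stack.hi
  obtain ⟨B, hB, hin⟩ := hpre.book.book
  have hok := hpre.book.ok
  -- the struct at `c` is kept
  have hd1 : ∀ w, w ∈ ws → (Codebook.block (Deint.cOf e)).base + (Codebook.block (Deint.cOf e)).size ≤ w.lo ∨
      w.hi ≤ (Codebook.block (Deint.cOf e)).base := by
    intro w hw
    have := (hoff w hw).book
    simp only [Off.sizeof.Codebook]
    omega
  have hkept : (Codebook.block (Deint.cOf e)).Kept m m' :=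
    Block.Kept.of_sameExcept hs hd1 (Codebook.block_no_wrap hok hB hin)
  have hsf : Codebook.SameFields m m' (Deint.cOf e) := Codebook.SameFields.of_kept hkept
  -- … and the `sorted_values` block
  have hd2 : 1 ≤ Codebook.sorted_entries m (Deint.cOf e) → ∀ w, w ∈ ws →
      (Codebook.svBlock m (Deint.cOf e)).base + (Codebook.svBlock m (Deint.cOf e)).size ≤ w.lo ∨
        w.hi ≤ (Codebook.svBlock m (Deint.cOf e)).base := by
    intro hse w hw
    rw [h.book.sorted_entries] at hse
    have := (hoff w hw).sv hse
    unfold Codebook.svBlock at this ⊢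
    rw [h.book.sorted_values, h.book.sorted_entries]
    exact this
  -- `*f` reads the same
  have hobj : ObjSame (Deint.fOf e) m m' := by
    have hw := where_decoder hpre
    apply ObjSame.of_sameExcept hs (by simp only [Off.sizeof.stb_vorbis]; omega)
    intro w hw
    have := (hoff w hw).obj
    omega
  have hslot : ∀ (a : Word) (k : Nat), (e.reg .rsp).toNat - 92 ≤ a.toNat → a.toNat + k ≤ (e.reg .rsp).toNat + 24 →
      m'.readLE a k = m.readLE a k :=
    fun a k h1 h2 => slot_keep hs hoff a k h1 h2 (by omega)
  refine ⟨?_, ?_, ?_, ?_, ?_, ?_, ?_, ?_, ?_, ?_, ?_, ?_, ?_, ?_, ?_, ?_, ?_, ?_, ?_, ?_, ?_, ?_, ?_, ?_, ?_⟩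
  · rw [hslot _ _ (by u_omega) (by u_omega)]
    exact h.ra
  · rw [hslot _ _ (by u_omega) (by u_omega)]
    exact h.r15
  · rw [hslot _ _ (by u_omega) (by u_omega)]
    exact h.r14
  · rw [hslot _ _ (by u_omega) (by u_omega)]
    exact h.r13
  · rw [hslot _ _ (by u_omega) (by u_omega)]
    exact h.r12
  · rw [hslot _ _ (by u_omega) (by u_omega)]
    exact h.rbp
  · rw [hslot _ _ (by u_omega) (by u_omega)]
    exact h.rbx
  · exact h.same.step_same hs (fun w hw => (hoff w hw).foot)
  · show Mem.EqOn L.textLo L.textHi u₀.mem m'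
    refine Mem.EqOn.step_same h.code hs ?_
    intro w hw
    have := (hoff w hw).text
    have e1 : L.textHi = 0x119d40 := rfl
    omega
  · show Mem.EqOn 0xC00000 0xE00000 e.mem m'
    refine Mem.EqOn.step_same h.untouched hs ?_
    intro w hw
    have := (hoff w hw).shadow
    omega
  · refine ⟨h.reader.bits.frame hobj, ?_⟩
    have e1 : mu m' (Deint.fOf e) = mu m (Deint.fOf e) := mu_transfer (hobj.sub (by decide))
    have := h.reader.mu_le
    omega
  · exact h.cb.frame_sameExcept hok hB hin hs hd1 hd2
  · exact h.apart.frame hsf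
  · exact ⟨hsf.dimensions.trans h.book.dimensions, hsf.entries.trans h.book.entries,
      hsf.codeword_lengths.trans h.book.codeword_lengths, hsf.minimum_value.trans h.book.minimum_value,
      hsf.delta_value.trans h.book.delta_value, hsf.value_bits.trans h.book.value_bits,
      hsf.lookup_type.trans h.book.lookup_type, hsf.sequence_p.trans h.book.sequence_p, hsf.sparse.trans h.book.sparse,
      hsf.lookup_values.trans h.book.lookup_values, hsf.multiplicands.trans h.book.multiplicands,
      hsf.codewords.trans h.book.codewords, fun k hk => (hsf.fast_huffman k hk).trans (h.book.fast_huffman k hk),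
      hsf.sorted_codewords.trans h.book.sorted_codewords, hsf.sorted_values.trans h.book.sorted_values,
      hsf.sorted_entries.trans h.book.sorted_entries⟩
  · rw [hsf.lookup_type]
    exact h.type2
  · rw [hslot _ _ (by u_omega) (by u_omega)]
    exact h.chSlot
  · rw [hslot _ _ (by u_omega) (by u_omega)]
    exact h.outsSlot
  · rw [hslot _ _ (by u_omega) (by u_omega)]
    exact h.fSlot
  · rw [hslot _ _ (by u_omega) (by u_omega)]
    exact h.cpSlot
  · rw [hslot _ _ (by u_omega) (by u_omega)]
    exact h.ppSlot
  · rw [hslot _ _ (by u_omega) (by u_omega)]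
    exact h.lenSlot
  · intro k hk
    have hw := where_table hpre hroom
    have heq : Mem.EqOn (Deint.outsOf e) (Deint.outsOf e + 8 * Deint.chOf e) m m' := by
      apply hs.eqOn
      intro w hw
      have := (hoff w hw).table
      omega
    rw [heq.ptr _ (by omega) (by omega) (by omega)]
    exact h.table k hk
  · have hw := where_site hpre hroom hpre.cpSite
    have heq : Mem.EqOn (Deint.cpOf e) (Deint.cpOf e + 4) m m' := by
      apply hs.eqOn
      intro w hw
      have := (hoff w hw).cp
      omega
    rw [heq.i32 _ (Nat.le_refl _) (Nat.le_refl _) (by simp only [Deint.cpOf]; omega)]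
    exact h.cInt
  · have hw := where_site hpre hroom hpre.ppSite
    have heq : Mem.EqOn (Deint.ppOf e) (Deint.ppOf e + 4) m m' := by
      apply hs.eqOn
      intro w hw
      have := (hoff w hw).pp
      omega
    rw [heq.i32 _ (Nat.le_refl _) (Nat.le_refl _) (by simp only [Deint.ppOf]; omega)]
    exact h.pInt
  · rw [hslot _ _ (by u_omega) (by u_omega)]
    exact h.tdSlot

/-! ### Element addresses and 32-bit counters as numbers -/

/-- The low half of a small number held in a register. -/
theorem part32_ofNat_toNat (n : Nat) (h : n < 2 ^ 32) : (Word.part .w32 (UInt64.ofNat n)).toNat = n := by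
  rw [Vorbis.toNat_part32, UInt64.toNat_ofNat']
  omega

/-- A non-negative 32-bit value sign-extended to 64 bits is the value. -/
theorem sext_small (v : BitVec 32) (h : v.toNat < 2 ^ 31) : Word.ofBV (BitVec.signExtend 64 v) = UInt64.ofNat v.toNat := by
  rw [ofBV_signExtend64]
  have e : v.toInt = (v.toNat : Int) := by
    rw [BitVec.toInt_eq_toNat_cond]
    rw [if_pos (by omega)]
  rw [e, word_nonneg _ (Int.natCast_nonneg _), Int.toNat_natCast]
  rfl

/-- `lea ebx, [r13 + r14] ; movsxd rbx, ebx ; shl rbx, 2 ; add rbx, [r12 + 20H]`: the address of `multiplicands[zd + i]`. -/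
theorem mult_addr (i zd M : Nat) (h : zd + i < 2 ^ 31) (hM : M + 4 * (zd + i) < 2 ^ 64) :
    Word.ofBV (BitVec.signExtend 64 (BitVec.setWidth 32 (UInt64.ofNat i + UInt64.ofNat zd).toBitVec)) <<< 2 + UInt64.ofNat M =
      addr (M + 4 * (zd + i)) := by
  apply eq_addr
  have ex : (UInt64.ofNat i + UInt64.ofNat zd).toNat % 2 ^ 32 = zd + i := by
    rw [UInt64.toNat_add, UInt64.toNat_ofNat', UInt64.toNat_ofNat']
    omega
  have := sext32_shl2_add (UInt64.ofNat i + UInt64.ofNat zd) M (by omega) (by omega)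
  rw [ex] at this
  exact this

/-- `movsxd rax, ebp ; lea rbx, [rsi + rax*8]`: the address of `outputs[c]`. -/
theorem table_addr (x : Word) (c : Nat) (h : c < 2 ^ 31) (hx : x.toNat + 8 * c < 2 ^ 64) :
    x + Word.ofBV (BitVec.signExtend 64 (Word.part .w32 (UInt64.ofNat c))) * 8 = addr (x.toNat + 8 * c) := by
  have e1 := part32_ofNat_toNat c (by omega)
  rw [sext_small _ (by omega), e1]
  apply eq_addr
  rw [UInt64.toNat_add, UInt64.toNat_mul, UInt64.toNat_ofNat']
  have e8 : (8 : UInt64).toNat = 8 := by decide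
  rw [e8]
  omega

/-- `movsxd rdx, [rsp + 8] ; lea rbx, [rax + rdx*4]`: the address of `outputs[c][p]`. -/
theorem cell_addr (Q p : Nat) (h : p < 2 ^ 31) (hQ : Q + 4 * p < 2 ^ 64) :
    UInt64.ofNat Q + Word.ofBV (BitVec.signExtend 64 (BitVec.ofNat 32 p)) * 4 = addr (Q + 4 * p) := by
  have e1 : (BitVec.ofNat 32 p).toNat = p := by
    rw [BitVec.toNat_ofNat]
    omega
  rw [sext_small _ (by omega), e1]
  apply eq_addr
  rw [UInt64.toNat_add, UInt64.toNat_mul, UInt64.toNat_ofNat', UInt64.toNat_ofNat']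
  have e4 : (4 : UInt64).toNat = 4 := by decide
  rw [e4]
  omega

/-- `add r13d, 1` / `add ebp, 1` on a small counter. -/
theorem counter_succ (i : Nat) (h : i + 1 < 2 ^ 32) :
    Word.ofBV (Word.part .w32 (UInt64.ofNat i) + 1#32) = UInt64.ofNat (i + 1) := by
  apply UInt64.toNat_inj.mp
  rw [Vorbis.toNat_ofBV32, BitVec.toNat_add, part32_ofNat_toNat i (by omega), UInt64.toNat_ofNat']
  simp only [BitVec.toNat_ofNat]
  omega

/-- The value `cmp [rsp + 0CH], ebp` compares with. -/
theorem counter_succ_toNat (c : Nat) (h : c + 1 < 2 ^ 32) : (Word.part .w32 (UInt64.ofNat c) + 1#32).toNat = c + 1 := by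
  rw [BitVec.toNat_add, part32_ofNat_toNat c (by omega)]
  simp only [BitVec.toNat_ofNat, Width.bits]
  omega

/-- `add DWORD PTR [rsp + 8], 1` on a small `p_inter`. -/
theorem slot_succ (p : Nat) (h : p + 1 < 2 ^ 32) : (BitVec.ofNat 32 p + 1#32).toNat = p + 1 := by
  rw [BitVec.toNat_add]
  simp only [BitVec.toNat_ofNat]
  omega

/-- `mov ebp, 0`. -/
theorem zero32 : Word.ofBV 0#32 = UInt64.ofNat 0 := by
  decide

/-- The signed view of a small counter. -/
theorem deint3_part32_toInt_small (n : Nat) (h : n < 2 ^ 31) : (Word.part .w32 (UInt64.ofNat n)).toInt = (n : Int) := by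
  rw [BitVec.toInt_eq_toNat_cond, part32_ofNat_toNat n (by omega)]
  simp only [Width.bits]
  rw [if_pos (by omega)]

/-! ### The two kinds of windows the body stores into -/

/-- **The scratch window**: `[rsp − 8, rsp + 12)` of the steady stack pointer — the return addresses of the check calls, the
slots `[rsp+4]` (`last`) and `[rsp+8]` (`p_inter`) — meets nothing `MemInv` reads. -/
theorem OffAll.scratch {others : List Obj} {frames : List (Nat × FrameLayout)} {Blk : Block → Prop} {len : Nat} {e : State}
    (hpre : DeintPre others frames Blk len e) (hroom : 7340032 + 496 ≤ (e.reg .rsp).toNat) :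
    OffAll others frames Blk len e ⟨(e.reg .rsp).toNat - 112, (e.reg .rsp).toNat - 92⟩ := by
  have htop := hpre.args.stack.hi
  have h1 := where_decoder hpre
  have h2 := where_book hpre hroom
  have h3 := where_table hpre hroom
  have h4 := where_site hpre hroom hpre.cpSite
  have h5 := where_site hpre hroom hpre.ppSite
  refine ⟨?_, ?_, ?_, ?_, ?_, ?_, ?_, ?_, ?_, ?_⟩
  · simp only []
    omega
  · simp only []
    omega
  · simp only [Deint.cOf]
    omega
  · intro hse
    simp only [Deint.cOf] at hse ⊢
    have hw := where_blk hpre hroom (hpre.book.cb.K4.sv hse) (by simp only []; omega)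
    simp only [] at hw ⊢
    omega
  · simp only []
    omega
  · simp only [Deint.cpOf]
    omega
  · simp only [Deint.ppOf]
    omega
  · simp only []
    omega
  · simp only []
    omega
  · intro a ha1 ha2
    refine ⟨⟨(e.reg .rsp).toNat - 496, (e.reg .rsp).toNat⟩, ?_, ?_, ?_⟩
    · simp only [X86.User.Spec.footprint, vspec]
      exact List.mem_cons_self
    · simp only [] at ha1 ⊢
      omega
    · simp only [] at ha2 ⊢
      omega

/-- **One float `outputs[k][p]`** (`k < ch`, a non-NULL pointer, `p < len`) meets nothing `MemInv` reads (`DeintApart`) and lies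
inside the contract's footprint. -/
theorem OffAll.cell {others : List Obj} {frames : List (Nat × FrameLayout)} {Blk : Block → Prop} {len : Nat} {e : State}
    (hpre : DeintPre others frames Blk len e) (hroom : 7340032 + 496 ≤ (e.reg .rsp).toNat) {k p : Nat}
    (hk : k < Deint.chOf e) (hq : e.mem.ptr (Deint.outsOf e + 8 * k) ≠ 0) (hp : p < Deint.lenOf e) :
    OffAll others frames Blk len e
      ⟨e.mem.ptr (Deint.outsOf e + 8 * k) + 4 * p, e.mem.ptr (Deint.outsOf e + 8 * k) + 4 * p + 4⟩ := by
  have hw := where_win hpre hroom hk hq (by omega)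
  have hap := hpre.apart
  refine ⟨?_, ?_, ?_, ?_, ?_, ?_, ?_, ?_, ?_, ?_⟩
  · simp only []
    omega
  · have := hap.winObj k hk hq
    simp only [deint.window, vblock, Off.sizeof.stb_vorbis] at this
    simp only [Deint.fOf, Deint.outsOf, Deint.lenOf] at hp ⊢
    omega
  · have := hap.winBook k hk hq
    simp only [deint.window, vblock, Off.sizeof.Codebook] at this
    simp only [Deint.cOf, Deint.outsOf, Deint.lenOf] at hp ⊢
    omega
  · intro hse
    have := hap.winSv k hk hq hse
    simp only [deint.window, vblock] at this
    simp only [Deint.cOf, Deint.outsOf, Deint.lenOf] at hp ⊢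
    omega
  · have := hap.winTable k hk hq
    simp only [deint.window, vblock] at this
    simp only [Deint.chOf, Deint.outsOf, Deint.lenOf] at hp ⊢
    omega
  · have := hap.winCp k hk hq
    simp only [deint.window, vblock] at this
    simp only [Deint.cpOf, Deint.outsOf, Deint.lenOf] at hp ⊢
    omega
  · have := hap.winPp k hk hq
    simp only [deint.window, vblock] at this
    simp only [Deint.ppOf, Deint.outsOf, Deint.lenOf] at hp ⊢
    omega
  · simp only []
    omega
  · simp only []
    omega
  · intro a ha1 ha2
    refine ⟨(deint.window e.mem (e.reg .rdx).toNat (e.mem.u32 ((e.reg .rsp).toNat + 8)) k).span, ?_, ?_, ?_⟩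
    · simp only [X86.User.Spec.footprint, vspec, deint.wins]
      apply List.mem_cons_of_mem
      apply List.mem_append_right
      exact List.mem_map.mpr ⟨k, List.mem_filter.mpr ⟨List.mem_range.mpr hk, decide_eq_true hq⟩, rfl⟩
    · simp only [deint.window, vblock, Deint.outsOf] at ha1 ⊢
      omega
    · simp only [deint.window, vblock, Deint.outsOf, Deint.lenOf] at ha2 hp ⊢
      omega

/-! ### The loads of the body and the sites of its four checks -/

/-- `[r12 + 20H]` = `c->multiplicands`, as at entry. -/
theorem MemInv.read_mult {others : List Obj} {frames : List (Nat × FrameLayout)} {Blk : Block → Prop} {len : Nat} {u₀ : State}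
    {ret : Word} {e : State} {td : Int} {m : Mem} (h : MemInv others frames Blk len u₀ ret e td m) :
    m.readLE (e.reg .rsi + 32) 8 = Codebook.multiplicands e.mem (Deint.cOf e) := by
  have ha : addr ((e.reg .rsi).toNat + 32) = e.reg .rsi + 32 := by
    rw [← addr_add_lit, addr_toNat]
  rw [← h.book.multiplicands, ← ha]
  rfl

/-- `[outputs + 8·c]` = `outputs[c]`, as at entry. -/
theorem MemInv.read_table {others : List Obj} {frames : List (Nat × FrameLayout)} {Blk : Block → Prop} {len : Nat} {u₀ : State}
    {ret : Word} {e : State} {td : Int} {m : Mem} (h : MemInv others frames Blk len u₀ ret e td m) {k : Nat}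
    (hk : k < Deint.chOf e) :
    m.readLE (addr (Deint.outsOf e + 8 * k)) 8 = e.mem.ptr (Deint.outsOf e + 8 * k) := by
  rw [← h.table k hk]
  rfl

/-- Check 10DCD4H: the field `c->multiplicands`. -/
theorem site_field_mult {others : List Obj} {frames : List (Nat × FrameLayout)} {Blk : Block → Prop} {len : Nat} {e : State}
    (hpre : DeintPre others frames Blk len e) :
    Site (Live (stackObjs frames ++ others)) ((e.reg .rsi).toNat + 32) 8 := by
  obtain ⟨B, hB, hin⟩ := hpre.book.book
  exact Codebook.site_field hpre.book.reader.env.live hB hin 32 8 (by simp only [Off.sizeof.Codebook]; omega) (by omega) rfl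

/-- Check 10DCEDH: `c->multiplicands[zd + i]`, `i < effective` (K6 for `lookup_type = 2`; `Round.zd_le`); the index does not wrap
32 bits (FIX 3). -/
theorem site_mult {others : List Obj} {frames : List (Nat × FrameLayout)} {Blk : Block → Prop} {len : Nat} {u₀ : State}
    {ret : Word} {e : State} {td : Int} {m : Mem} (h : MemInv others frames Blk len u₀ ret e td m)
    (hpre : DeintPre others frames Blk len e) {ci pi eff zd : Nat} (hr : Deint.Round e ci pi eff zd td) {i : Nat}
    (hi : i < eff) :
    Site (Live (stackObjs frames ++ others)) (Codebook.multiplicands e.mem (Deint.cOf e) + 4 * (zd + i)) 4 ∧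
      zd + i < 2 ^ 29 := by
  have ht0 : Codebook.lookup_type e.mem (Deint.cOf e) = 2 := by
    rw [← h.book.lookup_type]
    exact h.type2
  have hcb := hpre.book.cb
  obtain ⟨sz, hsz, hblk⟩ := hcb.K6.mults ht0
  have hp := hcb.K6.prod_le ht0
  have hN := hcb.N_nonneg
  have hd := hcb.K1.dim_pos
  have hz := hr.zd_le
  simp only [Deint.nOf, Deint.dimOf, Deint.cOf] at hz
  have e1 : ((Codebook.N e.mem (e.reg .rsi).toNat).toNat * (Codebook.dimensions e.mem (e.reg .rsi).toNat).toNat : Nat) =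
      (Codebook.N e.mem (e.reg .rsi).toNat * Codebook.dimensions e.mem (e.reg .rsi).toNat).toNat := by
    have e2 : ((Codebook.N e.mem (e.reg .rsi).toNat).toNat : Int) = Codebook.N e.mem (e.reg .rsi).toNat :=
      Int.toNat_of_nonneg hN
    have e3 : ((Codebook.dimensions e.mem (e.reg .rsi).toNat).toNat : Int) = Codebook.dimensions e.mem (e.reg .rsi).toNat :=
      Int.toNat_of_nonneg (by omega)
    apply Int.ofNat_inj.mp
    rw [Int.natCast_mul, e2, e3, Int.toNat_of_nonneg (Int.mul_nonneg hN (by omega))]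
  simp only [Deint.cOf]
  refine ⟨Site.of_blk hpre.book.reader.env.live hblk ?_ ?_ (by omega), ?_⟩
  · simp only []
    omega
  · simp only []
    omega
  · omega

/-- Check 10DD11H: `outputs[c]`, `c < ch`. -/
theorem site_table {others : List Obj} {frames : List (Nat × FrameLayout)} {Blk : Block → Prop} {len : Nat} {e : State}
    (hpre : DeintPre others frames Blk len e) {k : Nat} (hk : k < Deint.chOf e) :
    Site (Live (stackObjs frames ++ others)) (Deint.outsOf e + 8 * k) 8 := by
  simp only [Deint.chOf, Deint.outsOf] at hk ⊢
  exact hpre.table.sub (by omega) (by omega) (by omega)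

/-- Check 10DD2AH: `outputs[c][p]`, a non-NULL pointer, `p < len`. -/
theorem site_cell {others : List Obj} {frames : List (Nat × FrameLayout)} {Blk : Block → Prop} {len : Nat} {e : State}
    (hpre : DeintPre others frames Blk len e) {k p : Nat} (hk : k < Deint.chOf e)
    (hq : e.mem.ptr (Deint.outsOf e + 8 * k) ≠ 0) (hp : p < Deint.lenOf e) :
    Site (Live (stackObjs frames ++ others)) (e.mem.ptr (Deint.outsOf e + 8 * k) + 4 * p) 4 := by
  simp only [Deint.chOf, Deint.outsOf, Deint.lenOf] at hk hq hp ⊢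
  rcases hpre.outs k hk with h0 | ⟨sz, hsz, hB⟩
  · exact absurd h0 hq
  · refine Site.of_blk hpre.book.reader.env.live hB ?_ ?_ (by omega)
    · simp only []
      omega
    · simp only []
      omega

end Vorbis.Spec.codebook_decode_deinterleave_repeat_3
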